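-- pv_equiv track=rewrite | github.com/PiotrSCerebellum/AdventCalendar2023 | AdventDay3.py | confirmNumbers
-- ===== SOURCE A (Python) =====
-- def confirmNumbers(numbers,specials):
--     confirmedNumbers=[]
--     for number in numbers:
--         numberSurroudings=set()
--         for digit in number:
--             for x in range(3):
--                 for y in range(3):
--                     coordinates = (digit[0]+x-1,digit[1]+y-1)
--                     numberSurroudings.add(coordinates)
--         if len(numberSurroudings.intersection(specials))==0:
--             continue
--         confirmedNumbers.append(number)
--     return confirmedNumbers
-- ===== SOURCE B (Python) =====
-- def confirmNumbers(numbers, specials):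
--     # Expand each special once into its 3x3 halo of cells; a number is
--     # confirmed iff one of its own digit cells lies in that halo
--     # (digit d touches special p  <=>  d is in p's 3x3 neighbourhood).
--     halo = {(sx + dx, sy + dy) for (sx, sy) in specials
--             for dx in (-1, 0, 1) for dy in (-1, 0, 1)}
--     return [number for number in numbers if not halo.isdisjoint(number)]
-- ===== Notes on version B (the rewrite author's own statement) =====
-- stated objective: alternative
-- what changed: B inverts the expansion direction: instead of building a 3x3 surroundings set per number and intersecting it with specials, it precomputes once the 3x3 halo of all specials and keeps a number iff one of its own digit cells is in that halo (correct by symmetry of the adjacency relation).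
import Mathlib
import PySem

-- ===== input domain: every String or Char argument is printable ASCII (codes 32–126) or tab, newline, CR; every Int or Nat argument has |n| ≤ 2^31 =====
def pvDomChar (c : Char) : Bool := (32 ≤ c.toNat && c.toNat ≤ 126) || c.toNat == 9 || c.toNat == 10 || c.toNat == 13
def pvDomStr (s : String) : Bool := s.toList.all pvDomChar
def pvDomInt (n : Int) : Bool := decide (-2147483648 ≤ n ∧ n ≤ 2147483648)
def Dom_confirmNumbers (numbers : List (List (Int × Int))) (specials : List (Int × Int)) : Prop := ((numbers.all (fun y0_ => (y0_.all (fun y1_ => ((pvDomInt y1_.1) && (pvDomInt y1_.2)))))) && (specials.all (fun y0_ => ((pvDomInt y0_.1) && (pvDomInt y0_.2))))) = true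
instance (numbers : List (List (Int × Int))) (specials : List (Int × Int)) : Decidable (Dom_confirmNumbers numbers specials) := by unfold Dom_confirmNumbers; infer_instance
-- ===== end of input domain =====

-- B inverts the expansion direction: one precomputed 3x3 halo of all specials, a number is
-- kept iff one of its digit cells is in the halo; objective: alternative (same asymptotics).

-- ===== PORT A =====
-- the inner three loops of A: numberSurroudings built per number
def pvSurroundings (number : List (Int × Int)) : PySem.Set (Int × Int) :=
  number.foldl (fun s digit =>
    (PySem.List.pyRange 0 3 1).foldl (fun s x =>
      (PySem.List.pyRange 0 3 1).foldl (fun s y =>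
        PySem.Set.add s (digit.1 + x - 1, digit.2 + y - 1)) s) s) PySem.Set.empty

def confirmNumbers (numbers : List (List (Int × Int))) (specials : List (Int × Int)) : List (List (Int × Int)) :=
  numbers.foldl (fun confirmedNumbers number =>
    if PySem.Set.len (PySem.Set.inter (pvSurroundings number) specials) = 0 then
      confirmedNumbers
    else
      confirmedNumbers ++ [number]) []

-- ===== PORT B =====
-- the set comprehension of Source B: the 3x3 halo of every special cell
def pvHaloStep (s : PySem.Set (Int × Int)) (p : Int × Int) : PySem.Set (Int × Int) :=
  [(-1 : Int), 0, 1].foldl (fun s dx =>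
    [(-1 : Int), 0, 1].foldl (fun s dy =>
      PySem.Set.add s (p.1 + dx, p.2 + dy)) s) s

def pvHalo (specials : List (Int × Int)) : PySem.Set (Int × Int) :=
  specials.foldl pvHaloStep PySem.Set.empty

-- `not halo.isdisjoint(number)`: some element of `number` is in the halo (exact CPython semantics)
def pvNotDisjoint (halo : PySem.Set (Int × Int)) (number : List (Int × Int)) : Bool :=
  number.any (fun d => PySem.Set.contains halo d)

def confirmNumbers_alt (numbers : List (List (Int × Int))) (specials : List (Int × Int)) : List (List (Int × Int)) :=
  let halo := pvHalo specials
  numbers.filter (fun number => pvNotDisjoint halo number)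

-- ===== PRECONDITION & SPEC =====
def Spec_confirmNumbers (numbers : List (List (Int × Int))) (specials : List (Int × Int)) (out : List (List (Int × Int))) : Prop := out = confirmNumbers_alt numbers specials
instance (numbers : List (List (Int × Int))) (specials : List (Int × Int)) (out : List (List (Int × Int))) : Decidable (Spec_confirmNumbers numbers specials out) := by unfold Spec_confirmNumbers; infer_instance

-- ===== CLAIM (what is proved, stated in full; the proofs are below) =====
def Claim_equal_confirmNumbers : Prop := ∀ (numbers : List (List (Int × Int))) (specials : List (Int × Int)), Dom_confirmNumbers numbers specials → Spec_confirmNumbers numbers specials (confirmNumbers numbers specials)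

-- ===== LEMMAS AND PROOFS =====

-- the nine neighbour cells of a cell, as a predicate (symmetric: pvNbr d p ↔ pvNbr p d)
def pvNbr (d p : Int × Int) : Prop :=
  ∃ dx ∈ [(-1 : Int), 0, 1], ∃ dy ∈ [(-1 : Int), 0, 1], p = (d.1 + dx, d.2 + dy)

lemma pvNbr_of (d p : Int × Int) (h : pvNbr d p) : pvNbr p d := by
  obtain ⟨dx, hdx, dy, hdy, rfl⟩ := h
  refine ⟨-dx, ?_, -dy, ?_, ?_⟩
  · simp only [List.mem_cons, List.not_mem_nil, or_false] at hdx ⊢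
    rcases hdx with rfl | rfl | rfl <;> norm_num
  · simp only [List.mem_cons, List.not_mem_nil, or_false] at hdy ⊢
    rcases hdy with rfl | rfl | rfl <;> norm_num
  · simp only [Prod.ext_iff]
    constructor <;> simp

lemma pvNbr_symm (d p : Int × Int) : pvNbr d p ↔ pvNbr p d :=
  ⟨pvNbr_of d p, pvNbr_of p d⟩

lemma mem_digit_step (s : PySem.Set (Int × Int)) (d : Int × Int) (p : Int × Int) :
    p ∈ (PySem.List.pyRange 0 3 1).foldl (fun s x =>
          (PySem.List.pyRange 0 3 1).foldl (fun s y =>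
            PySem.Set.add s (d.1 + x - 1, d.2 + y - 1)) s) s ↔ p ∈ s ∨ pvNbr d p := by
  have h3 : PySem.List.pyRange 0 3 1 = [0, 1, 2] := by decide
  simp only [h3, List.foldl, PySem.Set.mem_add, pvNbr]
  constructor
  · rintro (((((((((h | h) | h) | h) | h) | h) | h) | h) | h) | h)
    · exact Or.inl h
    · exact Or.inr ⟨-1, by simp, -1, by simp, by rw [h]; congr 1 <;> ring⟩
    · exact Or.inr ⟨-1, by simp, 0, by simp, by rw [h]; congr 1 <;> ring⟩
    · exact Or.inr ⟨-1, by simp, 1, by simp, by rw [h]; congr 1 <;> ring⟩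
    · exact Or.inr ⟨0, by simp, -1, by simp, by rw [h]; congr 1 <;> ring⟩
    · exact Or.inr ⟨0, by simp, 0, by simp, by rw [h]; congr 1 <;> ring⟩
    · exact Or.inr ⟨0, by simp, 1, by simp, by rw [h]; congr 1 <;> ring⟩
    · exact Or.inr ⟨1, by simp, -1, by simp, by rw [h]; congr 1 <;> ring⟩
    · exact Or.inr ⟨1, by simp, 0, by simp, by rw [h]; congr 1 <;> ring⟩
    · exact Or.inr ⟨1, by simp, 1, by simp, by rw [h]; congr 1 <;> ring⟩
  · rintro (h | ⟨dx, hdx, dy, hdy, rfl⟩)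
    · tauto
    · simp only [List.mem_cons, List.not_mem_nil, or_false] at hdx hdy
      rcases hdx with rfl | rfl | rfl <;> rcases hdy with rfl | rfl | rfl <;>
        simp [Prod.ext_iff] <;> omega

lemma mem_halo_step (s : PySem.Set (Int × Int)) (p : Int × Int) (d : Int × Int) :
    d ∈ pvHaloStep s p ↔ d ∈ s ∨ pvNbr p d := by
  unfold pvHaloStep
  simp only [List.foldl, PySem.Set.mem_add, pvNbr]
  constructor
  · rintro (((((((((h | h) | h) | h) | h) | h) | h) | h) | h) | h)
    · exact Or.inl h
    · exact Or.inr ⟨-1, by simp, -1, by simp, h⟩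
    · exact Or.inr ⟨-1, by simp, 0, by simp, h⟩
    · exact Or.inr ⟨-1, by simp, 1, by simp, h⟩
    · exact Or.inr ⟨0, by simp, -1, by simp, h⟩
    · exact Or.inr ⟨0, by simp, 0, by simp, h⟩
    · exact Or.inr ⟨0, by simp, 1, by simp, h⟩
    · exact Or.inr ⟨1, by simp, -1, by simp, h⟩
    · exact Or.inr ⟨1, by simp, 0, by simp, h⟩
    · exact Or.inr ⟨1, by simp, 1, by simp, h⟩
  · rintro (h | ⟨dx, hdx, dy, hdy, rfl⟩)
    · tauto
    · simp only [List.mem_cons, List.not_mem_nil, or_false] at hdx hdy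
      rcases hdx with rfl | rfl | rfl <;> rcases hdy with rfl | rfl | rfl <;> tauto

lemma mem_surroundings_aux (number : List (Int × Int)) (s : PySem.Set (Int × Int)) (p : Int × Int) :
    p ∈ number.foldl (fun s digit =>
          (PySem.List.pyRange 0 3 1).foldl (fun s x =>
            (PySem.List.pyRange 0 3 1).foldl (fun s y =>
              PySem.Set.add s (digit.1 + x - 1, digit.2 + y - 1)) s) s) s ↔
      p ∈ s ∨ ∃ d ∈ number, pvNbr d p := by
  induction number generalizing s with
  | nil => simp
  | cons d t ih =>
    simp only [List.foldl_cons, ih, mem_digit_step, List.mem_cons]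
    constructor
    · rintro ((h | h) | ⟨d', hd', h⟩)
      · exact Or.inl h
      · exact Or.inr ⟨d, Or.inl rfl, h⟩
      · exact Or.inr ⟨d', Or.inr hd', h⟩
    · rintro (h | ⟨d', (rfl | hd'), h⟩)
      · exact Or.inl (Or.inl h)
      · exact Or.inl (Or.inr h)
      · exact Or.inr ⟨d', hd', h⟩

lemma mem_surroundings (number : List (Int × Int)) (p : Int × Int) :
    p ∈ pvSurroundings number ↔ ∃ d ∈ number, pvNbr d p := by
  unfold pvSurroundings
  rw [mem_surroundings_aux]
  simp [PySem.Set.empty]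

lemma mem_halo_aux (specials : List (Int × Int)) (s : PySem.Set (Int × Int)) (d : Int × Int) :
    d ∈ specials.foldl pvHaloStep s ↔
      d ∈ s ∨ ∃ p ∈ specials, pvNbr p d := by
  induction specials generalizing s with
  | nil => simp
  | cons p t ih =>
    simp only [List.foldl_cons, ih, mem_halo_step, List.mem_cons]
    constructor
    · rintro ((h | h) | ⟨p', hp', h⟩)
      · exact Or.inl h
      · exact Or.inr ⟨p, Or.inl rfl, h⟩
      · exact Or.inr ⟨p', Or.inr hp', h⟩
    · rintro (h | ⟨p', (rfl | hp'), h⟩)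
      · exact Or.inl (Or.inl h)
      · exact Or.inl (Or.inr h)
      · exact Or.inr ⟨p', hp', h⟩

lemma mem_halo (specials : List (Int × Int)) (d : Int × Int) :
    d ∈ pvHalo specials ↔ ∃ p ∈ specials, pvNbr p d := by
  unfold pvHalo
  rw [mem_halo_aux]
  simp [PySem.Set.empty]

lemma notDisjoint_iff (specials : List (Int × Int)) (number : List (Int × Int)) :
    pvNotDisjoint (pvHalo specials) number = true ↔
      ∃ p ∈ specials, ∃ d ∈ number, pvNbr d p := by
  unfold pvNotDisjoint
  simp only [List.any_eq_true, PySem.Set.contains_iff, mem_halo]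
  constructor
  · rintro ⟨d, hd, p, hp, h⟩
    exact ⟨p, hp, d, hd, (pvNbr_symm d p).2 h⟩
  · rintro ⟨p, hp, d, hd, h⟩
    exact ⟨d, hd, p, hp, (pvNbr_symm d p).1 h⟩

lemma cond_iff (specials : List (Int × Int)) (number : List (Int × Int)) :
    PySem.Set.len (PySem.Set.inter (pvSurroundings number) specials) = 0 ↔
      ¬ pvNotDisjoint (pvHalo specials) number = true := by
  rw [notDisjoint_iff]
  unfold PySem.Set.len
  constructor
  · intro h ⟨p, hp, hd⟩
    have hlen : (PySem.Set.inter (pvSurroundings number) specials).length = 0 := by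
      exact_mod_cast h
    have : p ∈ PySem.Set.inter (pvSurroundings number) specials := by
      rw [PySem.Set.mem_inter]
      exact ⟨(mem_surroundings number p).2 hd, hp⟩
    rw [List.length_eq_zero_iff] at hlen
    simp [hlen] at this
  · intro h
    have : PySem.Set.inter (pvSurroundings number) specials = [] := by
      rw [List.eq_nil_iff_forall_not_mem]
      intro p hp
      rw [PySem.Set.mem_inter, mem_surroundings] at hp
      exact h ⟨p, hp.2, hp.1⟩
    simp [this]

lemma foldl_eq_filter (numbers : List (List (Int × Int))) (specials : List (Int × Int))
    (acc : List (List (Int × Int))) :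
    numbers.foldl (fun confirmedNumbers number =>
        if PySem.Set.len (PySem.Set.inter (pvSurroundings number) specials) = 0 then
          confirmedNumbers
        else
          confirmedNumbers ++ [number]) acc =
      acc ++ numbers.filter (fun number => pvNotDisjoint (pvHalo specials) number) := by
  induction numbers generalizing acc with
  | nil => simp
  | cons n t ih =>
    simp only [List.foldl_cons, List.filter_cons]
    by_cases h : pvNotDisjoint (pvHalo specials) n = true
    · rw [if_neg (by rw [cond_iff]; exact fun hc => hc h), ih, if_pos h]
      simp
    · rw [if_pos ((cond_iff specials n).2 h), ih]
      simp [h]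

-- ===== VERDICT (by name: the statement is the Claim_ definition above) =====
theorem confirmNumbers_spec : Claim_equal_confirmNumbers := by
  intro numbers specials _
  unfold Spec_confirmNumbers confirmNumbers confirmNumbers_alt
  rw [foldl_eq_filter]
  simp
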